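-- pv_equiv track=rewrite | github.com/zhangsiyao618/Trim_Read | trim_read.py | base_by_base3
-- ===== SOURCE A (Python) =====
-- def base_by_base3(reads, phred_scores,records, threshold):
--     # Convert quality string to list of integers
--     trimmed_read = []
--     trimmed_phred_score = []
--     trimmed_records = []
--     for read, phred_score, record in zip(reads, phred_scores, records):
--         # If the sequence is already empty, return empty string
--         if len(read) == 0:
--             trimmed_read.append('')
--             trimmed_phred_score.append([])
--             trimmed_records.append('')
--             continue
--
--         # Calculate differences between quality scores and threshold 计算与阈值差值
--         diffs = [q - threshold for q in reversed(phred_score)]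
--         # Calculate cumulative sum of differences 计算差值累计
--         cumsum = list(reversed([sum(diffs[i:]) for i in range(len(diffs))]))
--
--         # Find minimum cumulative sum index 找到累计差值最小处
--         idx = cumsum.index(min(cumsum))
--
--         # Trim sequence and quality lists 在累计差值为最小处截断
--         trimmed_read.append(read[:len(read)-idx - 1])
--         trimmed_phred_score.append(phred_score[:len(phred_score)-idx - 1])
--         trimmed_records.append(record[:len(record)-idx - 1])
--     return trimmed_read, trimmed_phred_score, trimmed_records
-- ===== SOURCE B (Python) =====
-- def _min_prefix_index(phred, threshold):
--     # first index at which the running prefix sum of (q - threshold) is minimal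
--     s = phred[0] - threshold
--     best = s
--     bi = 0
--     i = 1
--     for q in phred[1:]:
--         s += q - threshold
--         if s < best:
--             best = s
--             bi = i
--         i += 1
--     return bi
--
--
-- def _trim(seq, cut, empty):
--     return empty if cut < 0 else seq[:len(seq) - cut - 1]
--
--
-- def base_by_base3(reads, phred_scores, records, threshold):
--     # Staged passes: compute each read's cut index once in a single linear scan
--     # (-1 marks an empty read), then build the three outputs by comprehensions.
--     triples = list(zip(reads, phred_scores, records))
--     cuts = [-1 if len(r) == 0 else _min_prefix_index(p, threshold)
--             for r, p, _ in triples]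
--     return ([_trim(r, c, '') for (r, _, _), c in zip(triples, cuts)],
--             [_trim(p, c, []) for (_, p, _), c in zip(triples, cuts)],
--             [_trim(x, c, '') for (_, _, x), c in zip(triples, cuts)])
-- ===== Notes on version B (the rewrite author's own statement) =====
-- stated objective: faster
-- what changed: Replaces A's per-read quadratic build of all suffix sums (plus reverse, min and index scans) by one linear scan tracking the running prefix sum and its first-minimum index, and replaces the single append loop by staged passes: a cut-index list computed once, then three comprehensions.
import Mathlib
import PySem

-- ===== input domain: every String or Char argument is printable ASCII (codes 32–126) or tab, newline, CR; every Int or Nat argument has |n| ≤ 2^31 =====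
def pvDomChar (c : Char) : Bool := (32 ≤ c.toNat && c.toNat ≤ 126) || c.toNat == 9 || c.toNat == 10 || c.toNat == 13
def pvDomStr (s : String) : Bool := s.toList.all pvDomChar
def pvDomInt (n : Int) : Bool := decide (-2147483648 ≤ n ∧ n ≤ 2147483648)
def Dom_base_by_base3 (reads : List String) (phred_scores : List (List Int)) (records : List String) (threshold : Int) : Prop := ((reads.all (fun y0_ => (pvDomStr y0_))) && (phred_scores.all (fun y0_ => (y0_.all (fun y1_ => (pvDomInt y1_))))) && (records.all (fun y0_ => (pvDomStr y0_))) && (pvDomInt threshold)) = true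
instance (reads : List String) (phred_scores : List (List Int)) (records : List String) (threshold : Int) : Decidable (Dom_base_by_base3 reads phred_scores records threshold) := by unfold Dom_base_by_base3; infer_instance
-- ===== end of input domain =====

-- B replaces A's per-read quadratic suffix-sum table by one linear scan that tracks the
-- running prefix sum and its first-minimum index, and builds the three outputs by staged
-- passes (a cut-index list, then three comprehensions) instead of one append loop.

-- ===== PORT A =====
-- loop body of A for one zipped (read, phred_score, record) triple
def pvBodyA (t : Int) (x : String × List Int × String) : String × List Int × String :=
  if PySem.Str.len x.1 = 0 then ("", [], "")
  else
    let diffs := (x.2.1.reverse).map (fun q => q - t)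
    let cumsum := ((List.range diffs.length).map (fun i => (diffs.drop i).sum)).reverse
    match PySem.List.min? cumsum (fun v => v) with
    | none => (x.1, x.2.1, x.2.2)  -- Python raises ValueError here (min of empty); excluded by Pre_
    | some m =>
      let idx : Nat := (PySem.List.index? cumsum m).getD 0
      (PySem.Str.slice x.1 none (some ((PySem.Str.len x.1 : Int) - idx - 1)),
       PySem.List.slice x.2.1 none (some ((x.2.1.length : Int) - idx - 1)),
       PySem.Str.slice x.2.2 none (some ((PySem.Str.len x.2.2 : Int) - idx - 1)))

def base_by_base3 (reads : List String) (phred_scores : List (List Int)) (records : List String) (threshold : Int) : List String × List (List Int) × List String :=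
  (reads.zip (phred_scores.zip records)).foldl
    (fun acc x =>
      let r := pvBodyA threshold x
      (acc.1 ++ [r.1], acc.2.1 ++ [r.2.1], acc.2.2 ++ [r.2.2]))
    ([], [], [])

-- ===== PORT B =====
-- _min_prefix_index's loop over phred[1:] with counter i, state (s, best, bi)
def pvMinIdxGo (t : Int) (s best : Int) (bi i : Nat) : List Int → Nat
  | [] => bi
  | q :: rest =>
    let s' := s + (q - t)
    if s' < best then pvMinIdxGo t s' s' i (i + 1) rest
    else pvMinIdxGo t s' best bi (i + 1) rest

def pvMinIdx (t : Int) (p : List Int) : Nat :=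
  match p with
  | [] => 0  -- Python indexes phred[0] here (IndexError); excluded by Pre_
  | q :: rest => pvMinIdxGo t (q - t) (q - t) 0 1 rest

-- _trim(seq, cut, empty)
def pvTrimS (s : String) (cut : Int) : String :=
  if cut < 0 then "" else PySem.Str.slice s none (some ((PySem.Str.len s : Int) - cut - 1))

def pvTrimL (p : List Int) (cut : Int) : List Int :=
  if cut < 0 then [] else PySem.List.slice p none (some ((p.length : Int) - cut - 1))

-- cut index for one triple (-1 marks an empty read)
def pvCut (t : Int) (x : String × List Int × String) : Int :=
  if PySem.Str.len x.1 = 0 then -1 else (pvMinIdx t x.2.1 : Int)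

def base_by_base3_alt (reads : List String) (phred_scores : List (List Int)) (records : List String) (threshold : Int) : List String × List (List Int) × List String :=
  let triples := reads.zip (phred_scores.zip records)
  let cuts := triples.map (pvCut threshold)
  ((triples.zip cuts).map (fun y => pvTrimS y.1.1 y.2),
   (triples.zip cuts).map (fun y => pvTrimL y.1.2.1 y.2),
   (triples.zip cuts).map (fun y => pvTrimS y.1.2.2 y.2))

-- ===== PRECONDITION & SPEC =====
-- Pre_ excludes the inputs where some zipped triple has a non-empty read but an empty
-- phred-score list: Python A raises ValueError (min() of an empty sequence) there.
def Pre_base_by_base3 (reads : List String) (phred_scores : List (List Int)) (records : List String) (threshold : Int) : Prop :=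
  ∀ x ∈ reads.zip (phred_scores.zip records), PySem.Str.len x.1 = 0 ∨ x.2.1 ≠ []
instance (reads : List String) (phred_scores : List (List Int)) (records : List String) (threshold : Int) : Decidable (Pre_base_by_base3 reads phred_scores records threshold) := by unfold Pre_base_by_base3; infer_instance

def pvWitness_base_by_base3 : List String × List (List Int) × List String × Int := (["AB", ""], [[30, 2], []], ["ab", "c"], 10)

def Spec_base_by_base3 (reads : List String) (phred_scores : List (List Int)) (records : List String) (threshold : Int) (out : List String × List (List Int) × List String) : Prop := out = base_by_base3_alt reads phred_scores records threshold
instance (reads : List String) (phred_scores : List (List Int)) (records : List String) (threshold : Int) (out : List String × List (List Int) × List String) : Decidable (Spec_base_by_base3 reads phred_scores records threshold out) := by unfold Spec_base_by_base3; infer_instance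

-- ===== CLAIM (what is proved, stated in full; the proofs are below) =====
def Claim_equal_base_by_base3 : Prop := ∀ (reads : List String) (phred_scores : List (List Int)) (records : List String) (threshold : Int), Dom_base_by_base3 reads phred_scores records threshold → Pre_base_by_base3 reads phred_scores records threshold → Spec_base_by_base3 reads phred_scores records threshold (base_by_base3 reads phred_scores records threshold)

-- ===== LEMMAS AND PROOFS =====

-- the common intermediate object: the list of prefix sums of (q - t) over p
def pvP (t : Int) (p : List Int) : List Int :=
  (List.range p.length).map (fun m => ((p.take (m+1)).map (fun q => q - t)).sum)

theorem pvP_length (t : Int) (p : List Int) : (pvP t p).length = p.length := by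
  simp [pvP]

theorem pvP_append (t : Int) (l : List Int) (x : Int) :
    pvP t (l ++ [x]) = pvP t l ++ [(l.map (fun q => q - t)).sum + (x - t)] := by
  simp only [pvP, List.length_append, List.length_singleton, List.range_succ, List.map_append]
  congr 1
  · apply List.map_congr_left
    intro m hm
    have h : m + 1 ≤ l.length := by simpa using List.mem_range.mp hm
    rw [List.take_append_of_le_length h]
  · simp

theorem pvMin_append (xs : List Int) (hxs : xs ≠ []) (m s : Int)
    (hmin : PySem.List.min? xs (fun v => v) = some m) :
    PySem.List.min? (xs ++ [s]) (fun v => v) = some (min m s) := by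
  obtain ⟨a, tl, rfl⟩ := List.exists_cons_of_ne_nil hxs
  rw [PySem.List.min?_id_cons] at hmin
  rw [List.cons_append, PySem.List.min?_id_cons, List.foldl_append]
  simp_all

-- A's reversed suffix-sum table is exactly the prefix-sum list pvP
theorem pvCumsum_eq (t : Int) (p : List Int) :
    (((List.range ((p.reverse.map (fun q => q - t)).length)).map
        (fun i => ((p.reverse.map (fun q => q - t)).drop i).sum)).reverse) = pvP t p := by
  apply List.ext_getElem
  · simp [pvP]
  · intro j hj hj2
    have hn : j < p.length := by simpa [pvP] using hj2
    simp only [List.getElem_reverse, List.length_map, List.length_reverse, List.length_range,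
      List.getElem_map, List.getElem_range, pvP]
    rw [← List.map_drop, List.drop_reverse]
    have h1 : p.length - (p.length - 1 - j) = j + 1 := by omega
    simp [h1]

-- proof-side reference fold: running sum, first minimum (best, index), position counter
def pvFoldStep (t : Int) (st : Int × Option (Int × Nat) × Nat) (q : Int) : Int × Option (Int × Nat) × Nat :=
  let s := st.1 + (q - t)
  match st.2.1 with
  | none => (s, some (s, st.2.2), st.2.2 + 1)
  | some (b, bi) =>
    if s < b then (s, some (s, st.2.2), st.2.2 + 1) else (s, some (b, bi), st.2.2 + 1)

-- the reference fold computes the running sum, the minimum of pvP, and its first index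
theorem pvFold_char (t : Int) (p : List Int) (hp : p ≠ []) :
    ∃ m i, PySem.List.min? (pvP t p) (fun v => v) = some m ∧
      PySem.List.index? (pvP t p) m = some i ∧
      p.foldl (pvFoldStep t) (0, none, 0)
      = ((p.map (fun q => q - t)).sum, some (m, i), p.length) := by
  induction p using List.reverseRecOn with
  | nil => exact absurd rfl hp
  | append_singleton l x ih =>
    rcases eq_or_ne l [] with rfl | hl
    · exact ⟨x - t, 0, by simp [pvP, PySem.List.min?_id_cons], by simp [pvP], by simp [pvFoldStep]⟩
    · obtain ⟨m, i, hmin, hidx, hst⟩ := ih hl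
      rw [List.foldl_append, hst]
      have hmem : m ∈ pvP t l := PySem.List.min?_mem hmin
      have hPne : pvP t l ≠ [] := List.ne_nil_of_mem hmem
      set s : Int := (l.map (fun q => q - t)).sum + (x - t) with hs
      have hminApp := pvMin_append _ hPne m s hmin
      simp only [List.foldl_cons, List.foldl_nil, pvFoldStep]
      show ∃ _ _, _
      by_cases hlt : s < m
      · refine ⟨s, l.length, ?_, ?_, ?_⟩
        · rw [pvP_append, ← hs, hminApp, min_eq_right (le_of_lt hlt)]
        · have hnot : s ∉ pvP t l := by
            intro hmem2
            exact absurd (PySem.List.min?_isMin hmin s hmem2) (by omega)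
          rw [pvP_append, ← hs, PySem.List.index?_append_singleton_self _ s hnot, pvP_length]
        · rw [if_pos hlt]
          simp [← hs]
      · refine ⟨m, i, ?_, ?_, ?_⟩
        · rw [pvP_append, ← hs, hminApp, min_eq_left (not_lt.mp hlt)]
        · rw [pvP_append, ← hs, PySem.List.index?_append_of_mem _ hmem, hidx]
        · rw [if_neg hlt]
          simp [← hs]

-- B's tail-recursive scan agrees with the reference fold
theorem pvMinIdxGo_fold (rest : List Int) (t : Int) :
    ∀ (s b : Int) (bi i : Nat), ∃ B j,
      (rest.foldl (pvFoldStep t) (s, some (b, bi), i)).2.1 = some (B, j) ∧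
      pvMinIdxGo t s b bi i rest = j := by
  induction rest with
  | nil => exact fun s b bi i => ⟨b, bi, rfl, rfl⟩
  | cons q rest ih =>
    intro s b bi i
    simp only [List.foldl_cons, pvFoldStep, pvMinIdxGo]
    by_cases h : s + (q - t) < b
    · rw [if_pos h, if_pos h]; exact ih _ _ _ _
    · rw [if_neg h, if_neg h]; exact ih _ _ _ _

-- pvMinIdx is the first index of the minimum of the prefix-sum list
theorem pvMinIdx_char (t : Int) (p : List Int) (hp : p ≠ []) :
    ∃ m, PySem.List.min? (pvP t p) (fun v => v) = some m ∧
      PySem.List.index? (pvP t p) m = some (pvMinIdx t p) := by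
  obtain ⟨x, rest, rfl⟩ := List.exists_cons_of_ne_nil hp
  obtain ⟨m, i, hmin, hidx, hst⟩ := pvFold_char t (x :: rest) hp
  rw [List.foldl_cons] at hst
  have h1 : pvFoldStep t (0, none, 0) x = (x - t, some (x - t, 0), 1) := by
    simp [pvFoldStep]
  rw [h1] at hst
  obtain ⟨B, j, hsome, hgo⟩ := pvMinIdxGo_fold rest t (x - t) (x - t) 0 1
  rw [hst] at hsome
  have hB : B = m ∧ j = i := by
    have := hsome.symm
    simp only [Option.some_inj, Prod.mk.injEq] at this
    exact this
  refine ⟨m, hmin, ?_⟩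
  show PySem.List.index? _ m = some (pvMinIdxGo t (x - t) (x - t) 0 1 rest)
  rw [hgo, hB.2, hidx]

-- the two per-triple computations agree on every admitted triple
theorem pvBody_eq (t : Int) (x : String × List Int × String)
    (hx : PySem.Str.len x.1 = 0 ∨ x.2.1 ≠ []) :
    pvBodyA t x = (pvTrimS x.1 (pvCut t x), pvTrimL x.2.1 (pvCut t x), pvTrimS x.2.2 (pvCut t x)) := by
  unfold pvBodyA pvCut pvTrimS pvTrimL
  by_cases h0 : PySem.Str.len x.1 = 0
  · simp only [if_pos h0]
    norm_num
  · have hp : x.2.1 ≠ [] := hx.resolve_left h0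
    obtain ⟨m, hmin, hidx⟩ := pvMinIdx_char t x.2.1 hp
    have hneg : ¬ ((pvMinIdx t x.2.1 : Int) < 0) := by omega
    simp only [if_neg h0, if_neg hneg, pvCumsum_eq, hmin, hidx, Option.getD_some, sub_sub]

-- A's append loop produces the three projection maps
theorem pvFoldl_map (t : Int) (l : List (String × List Int × String)) :
    ∀ (a : List String) (b : List (List Int)) (c : List String),
      l.foldl (fun acc x =>
          let r := pvBodyA t x
          (acc.1 ++ [r.1], acc.2.1 ++ [r.2.1], acc.2.2 ++ [r.2.2])) (a, b, c)
      = (a ++ l.map (fun x => (pvBodyA t x).1),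
         b ++ l.map (fun x => (pvBodyA t x).2.1),
         c ++ l.map (fun x => (pvBodyA t x).2.2)) := by
  induction l with
  | nil => simp
  | cons y ys ih => intro a b c; simp [ih]

-- zipping the triple list with its cut list, then trimming, is one map per component
theorem pvZipTrim1 (l : List (String × List Int × String)) (c : String × List Int × String → Int) :
    (l.zip (l.map c)).map (fun y => pvTrimS y.1.1 y.2) = l.map (fun x => pvTrimS x.1 (c x)) := by
  induction l with
  | nil => rfl
  | cons y ys ih => simp [ih]

theorem pvZipTrim2 (l : List (String × List Int × String)) (c : String × List Int × String → Int) :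
    (l.zip (l.map c)).map (fun y => pvTrimL y.1.2.1 y.2) = l.map (fun x => pvTrimL x.2.1 (c x)) := by
  induction l with
  | nil => rfl
  | cons y ys ih => simp [ih]

theorem pvZipTrim3 (l : List (String × List Int × String)) (c : String × List Int × String → Int) :
    (l.zip (l.map c)).map (fun y => pvTrimS y.1.2.2 y.2) = l.map (fun x => pvTrimS x.2.2 (c x)) := by
  induction l with
  | nil => rfl
  | cons y ys ih => simp [ih]

-- ===== VERDICT (by name: the statement is the Claim_ definition above) =====
theorem base_by_base3_spec : Claim_equal_base_by_base3 := by
  intro reads phred_scores records threshold _ hpre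
  unfold Spec_base_by_base3 base_by_base3 base_by_base3_alt
  rw [pvFoldl_map]
  simp only [List.nil_append]
  rw [pvZipTrim1, pvZipTrim2, pvZipTrim3]
  refine Prod.ext ?_ (Prod.ext ?_ ?_) <;>
    · apply List.map_congr_left
      intro x hx
      rw [pvBody_eq threshold x (hpre x hx)]
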